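-- pv_equiv track=rewrite | github.com/larnitech/python-api | modbustcp/modbus.py | word_list_to_long
-- ===== SOURCE A (Python) =====
-- def word_list_to_long(val_list, big_endian=True, long_long=False):
--     """Word list (16 bits) to long (32 bits) or long long (64 bits) list.
--
--     By default, word_list_to_long() use big endian order. For use little endian, set
--     big_endian param to False. Output format could be long long with long_long.
--     option set to True.
--
--     :param val_list: list of 16 bits int value
--     :type val_list: list
--     :param big_endian: True for big endian/False for little (optional)
--     :type big_endian: bool
--     :param long_long: True for long long 64 bits, default is long 32 bits (optional)
--     :type long_long: bool
--     :returns: list of 32 bits int value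
--     :rtype: list
--     """
--     long_list = []
--     block_size = 4 if long_long else 2
--     # populate long_list (len is half or quarter of 16 bits val_list) with 32 or 64 bits value
--     for index in range(int(len(val_list) / block_size)):
--         start = block_size * index
--         long = 0
--         if big_endian:
--             if long_long:
--                 long += (val_list[start] << 48) + (val_list[start + 1] << 32)
--                 long += (val_list[start + 2] << 16) + (val_list[start + 3])
--             else:
--                 long += (val_list[start] << 16) + val_list[start + 1]
--         else:
--             if long_long:
--                 long += (val_list[start + 3] << 48) + (val_list[start + 2] << 32)
--             long += (val_list[start + 1] << 16) + val_list[start]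
--         long_list.append(long)
--     # return long list
--     return long_list
-- ===== SOURCE B (Python) =====
-- def word_list_to_long(val_list, big_endian=True, long_long=False):
--     """Word list (16 bits) to long (32 bits) or long long (64 bits) list."""
--     block_size = 4 if long_long else 2
--     it = iter(val_list)
--     long_list = []
--     # chunk into complete blocks of block_size words (remainder dropped)
--     for block in zip(*[it] * block_size):
--         if not big_endian:
--             block = block[::-1]
--         acc = 0
--         for word in block:
--             acc = (acc << 16) + word
--         long_list.append(acc)
--     return long_list
-- ===== Notes on version B (the rewrite author's own statement) =====
-- stated objective: simpler
-- what changed: Replaces index arithmetic with start offsets and four hand-unrolled constant-shift branches by the iterator chunking idiom zip(*[it]*block_size) plus one generic (acc << 16) + word fold over the (possibly reversed) block, handling 32- and 64-bit cases uniformly.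
import Mathlib
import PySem

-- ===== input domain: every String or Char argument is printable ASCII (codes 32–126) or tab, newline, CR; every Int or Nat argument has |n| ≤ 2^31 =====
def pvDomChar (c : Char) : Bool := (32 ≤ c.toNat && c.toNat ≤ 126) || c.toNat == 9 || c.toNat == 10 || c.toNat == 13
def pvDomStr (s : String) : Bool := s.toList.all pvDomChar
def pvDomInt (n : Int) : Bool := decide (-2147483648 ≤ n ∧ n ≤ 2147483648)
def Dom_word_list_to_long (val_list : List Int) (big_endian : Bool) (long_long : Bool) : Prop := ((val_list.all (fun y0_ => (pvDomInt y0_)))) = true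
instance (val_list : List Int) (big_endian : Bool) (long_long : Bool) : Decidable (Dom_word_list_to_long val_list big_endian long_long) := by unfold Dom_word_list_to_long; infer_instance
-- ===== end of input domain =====

-- ===== PORT A =====
-- B differs only in decomposition (generic chunk + fold vs unrolled shifts); same O(n) cost.
-- Port of A. Indices start..start+block_size-1 are always < len(val_list) inside the loop
-- (start+block_size ≤ block_size*int(len/block_size) ≤ len), so pyGetD with default 0 is exact.
def word_list_to_long (val_list : List Int) (big_endian : Bool) (long_long : Bool) : List Int :=
  let block_size : Int := if long_long then 4 else 2
  (PySem.List.pyRange 0 (PySem.Int.truncdiv (val_list.length : Int) block_size) 1).foldl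
    (fun long_list index =>
      let start := block_size * index
      let long : Int := 0
      let long :=
        if big_endian then
          if long_long then
            let long := long + ((PySem.List.pyGetD val_list start 0) <<< (48 : Nat)) + ((PySem.List.pyGetD val_list (start + 1) 0) <<< (32 : Nat))
            long + ((PySem.List.pyGetD val_list (start + 2) 0) <<< (16 : Nat)) + PySem.List.pyGetD val_list (start + 3) 0
          else
            long + ((PySem.List.pyGetD val_list start 0) <<< (16 : Nat)) + PySem.List.pyGetD val_list (start + 1) 0
        else
          let long := if long_long then
              long + ((PySem.List.pyGetD val_list (start + 3) 0) <<< (48 : Nat)) + ((PySem.List.pyGetD val_list (start + 2) 0) <<< (32 : Nat))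
            else long
          long + ((PySem.List.pyGetD val_list (start + 1) 0) <<< (16 : Nat)) + PySem.List.pyGetD val_list start 0
      long_list ++ [long]) []

-- ===== PORT B =====
-- B chunks the input with zip(*[iter(val_list)]*block_size): exactly the complete
-- blocks of block_size consecutive words, remainder dropped — rendered as this recursion.
def wllChunks (block_size : Nat) (l : List Int) : List (List Int) :=
  if h : 0 < block_size ∧ block_size ≤ l.length then
    l.take block_size :: wllChunks block_size (l.drop block_size)
  else []
termination_by l.length
decreasing_by simp only [List.length_drop]; omega

def word_list_to_long_alt (val_list : List Int) (big_endian : Bool) (long_long : Bool) : List Int :=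
  let block_size : Nat := if long_long then 4 else 2
  (wllChunks block_size val_list).map (fun block =>
    let block := if big_endian then block else block.reverse
    block.foldl (fun acc word => (acc <<< (16 : Nat)) + word) 0)

-- ===== PRECONDITION & SPEC =====
def Spec_word_list_to_long (val_list : List Int) (big_endian : Bool) (long_long : Bool) (out : List Int) : Prop := out = word_list_to_long_alt val_list big_endian long_long
instance (val_list : List Int) (big_endian : Bool) (long_long : Bool) (out : List Int) : Decidable (Spec_word_list_to_long val_list big_endian long_long out) := by unfold Spec_word_list_to_long; infer_instance

-- ===== CLAIM (what is proved, stated in full; the proofs are below) =====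
def Claim_equal_word_list_to_long : Prop := ∀ (val_list : List Int) (big_endian : Bool) (long_long : Bool), Dom_word_list_to_long val_list big_endian long_long → Spec_word_list_to_long val_list big_endian long_long (word_list_to_long val_list big_endian long_long)

-- ===== LEMMAS AND PROOFS =====

-- A's block value at block index k (as a function of the whole list), after casts are pushed in.
def wllBlockVal (val_list : List Int) (big_endian long_long : Bool) (k : Nat) : Int :=
  let bs : Nat := if long_long then 4 else 2
  if big_endian then
    if long_long then
      (val_list.getD (bs * k) 0 <<< (48 : Nat)) + (val_list.getD (bs * k + 1) 0 <<< (32 : Nat))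
        + (val_list.getD (bs * k + 2) 0 <<< (16 : Nat)) + val_list.getD (bs * k + 3) 0
    else
      (val_list.getD (bs * k) 0 <<< (16 : Nat)) + val_list.getD (bs * k + 1) 0
  else
    if long_long then
      (val_list.getD (bs * k + 3) 0 <<< (48 : Nat)) + (val_list.getD (bs * k + 2) 0 <<< (32 : Nat))
        + (val_list.getD (bs * k + 1) 0 <<< (16 : Nat)) + val_list.getD (bs * k) 0
    else
      (val_list.getD (bs * k + 1) 0 <<< (16 : Nat)) + val_list.getD (bs * k) 0

lemma wllGetD_cast0 (l : List Int) (bs k : Nat) :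
    PySem.List.pyGetD l ((bs : Int) * (k : Int)) 0 = l.getD (bs * k) 0 := by
  rw [show ((bs : Int) * (k : Int)) = ((bs * k : Nat) : Int) by push_cast; ring,
    PySem.List.pyGetD_natCast]

lemma wllGetD_cast1 (l : List Int) (bs k : Nat) :
    PySem.List.pyGetD l ((bs : Int) * (k : Int) + 1) 0 = l.getD (bs * k + 1) 0 := by
  rw [show ((bs : Int) * (k : Int) + 1) = ((bs * k + 1 : Nat) : Int) by push_cast; ring,
    PySem.List.pyGetD_natCast]

lemma wllGetD_cast2 (l : List Int) (bs k : Nat) :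
    PySem.List.pyGetD l ((bs : Int) * (k : Int) + 2) 0 = l.getD (bs * k + 2) 0 := by
  rw [show ((bs : Int) * (k : Int) + 2) = ((bs * k + 2 : Nat) : Int) by push_cast; ring,
    PySem.List.pyGetD_natCast]

lemma wllGetD_cast3 (l : List Int) (bs k : Nat) :
    PySem.List.pyGetD l ((bs : Int) * (k : Int) + 3) 0 = l.getD (bs * k + 3) 0 := by
  rw [show ((bs : Int) * (k : Int) + 3) = ((bs * k + 3 : Nat) : Int) by push_cast; ring,
    PySem.List.pyGetD_natCast]

lemma wllA_eq_map (val_list : List Int) (big_endian long_long : Bool) :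
    word_list_to_long val_list big_endian long_long =
      (List.range (val_list.length / (if long_long then 4 else 2))).map
        (wllBlockVal val_list big_endian long_long) := by
  unfold word_list_to_long
  have hbs : (if long_long then (4 : Int) else 2) = (((if long_long then 4 else 2) : Nat) : Int) := by
    cases long_long <;> rfl
  simp only [hbs]
  rw [show PySem.Int.truncdiv (val_list.length : Int) (((if long_long then 4 else 2) : Nat) : Int)
        = ((val_list.length / (if long_long then 4 else 2) : Nat) : Int) from rfl]
  rw [PySem.List.pyRange_zero_natCast, PySem.List.foldl_append_singleton_eq_map]
  simp only [List.nil_append, List.map_map]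
  refine List.map_congr_left ?_
  intro k _
  unfold wllBlockVal
  cases long_long <;> cases big_endian <;>
    simp only [Function.comp_apply, if_true, if_false, Bool.false_eq_true, zero_add,
      wllGetD_cast0, wllGetD_cast1, wllGetD_cast2, wllGetD_cast3]

lemma wllBlockVal_shift (l : List Int) (be ll : Bool) (k : Nat) :
    wllBlockVal l be ll (k + 1) = wllBlockVal (l.drop (if ll then 4 else 2)) be ll k := by
  have hg : ∀ (bs j : Nat), l.getD (bs * (k + 1) + j) 0 = (l.drop bs).getD (bs * k + j) 0 := by
    intro bs j
    simp only [List.getD_eq_getElem?_getD, List.getElem?_drop]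
    congr 2
    ring
  have hg0 : ∀ bs : Nat, l.getD (bs * (k + 1)) 0 = (l.drop bs).getD (bs * k) 0 := by
    intro bs
    simpa using hg bs 0
  unfold wllBlockVal
  cases ll <;> cases be <;>
    simp only [if_true, if_false, Bool.false_eq_true, hg, hg0]

-- the step of the main induction, once the block size is a literal (2 or 4)
lemma wllStep (big_endian long_long : Bool) (l : List Int)
    (hsmall : (if long_long then 4 else 2) ≤ l.length)
    (htail : word_list_to_long (l.drop (if long_long then 4 else 2)) big_endian long_long
      = word_list_to_long_alt (l.drop (if long_long then 4 else 2)) big_endian long_long) :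
    word_list_to_long l big_endian long_long = word_list_to_long_alt l big_endian long_long := by
  rw [wllA_eq_map]
  simp only [word_list_to_long_alt]
  have hbs0 : 0 < (if long_long then 4 else 2 : Nat) := by cases long_long <;> decide
  rw [Nat.div_eq_sub_div hbs0 hsmall, List.range_succ_eq_map]
  rw [wllChunks, dif_pos ⟨hbs0, hsmall⟩]
  simp only [List.map_cons, List.map_map]
  rw [wllA_eq_map] at htail
  simp only [word_list_to_long_alt, List.length_drop] at htail
  congr 1
  · -- head: A's unrolled shifts = B's fold on the (reversed) first block
    cases long_long
    · simp only [if_false, Bool.false_eq_true] at hsmall ⊢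
      rcases l with _ | ⟨a, _ | ⟨b, t⟩⟩
      · simp at hsmall
      · simp at hsmall
      · cases big_endian <;>
          simp [wllBlockVal, Int.shiftLeft_eq]
    · simp only [if_true] at hsmall ⊢
      rcases l with _ | ⟨a, _ | ⟨b, _ | ⟨c, _ | ⟨d, t⟩⟩⟩⟩
      · simp at hsmall
      · simp at hsmall
      · simp at hsmall
      · simp at hsmall
      · cases big_endian <;>
          simp [wllBlockVal, Int.shiftLeft_eq] <;> ring
  · -- tail: shift the block index by one, then the hypothesis on the dropped list
    calc (List.range ((l.length - (if long_long then 4 else 2)) / (if long_long then 4 else 2))).map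
          (fun k => wllBlockVal l big_endian long_long (k + 1))
        = (List.range ((l.length - (if long_long then 4 else 2)) / (if long_long then 4 else 2))).map
          (wllBlockVal (l.drop (if long_long then 4 else 2)) big_endian long_long) := by
          refine List.map_congr_left ?_
          intro k _
          exact wllBlockVal_shift l big_endian long_long k
      _ = _ := htail

lemma wllMain (big_endian long_long : Bool) (n : Nat) :
    ∀ l : List Int, l.length ≤ n →
      word_list_to_long l big_endian long_long = word_list_to_long_alt l big_endian long_long := by
  induction n with
  | zero =>
    intro l h
    have hl : l = [] := List.length_eq_zero_iff.mp (Nat.le_zero.mp h)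
    subst hl
    rw [wllA_eq_map]
    simp only [word_list_to_long_alt]
    rw [wllChunks, dif_neg (by cases long_long <;> decide)]
    simp
  | succ n ih =>
    intro l hlen
    by_cases hsmall : l.length < (if long_long then 4 else 2)
    · rw [wllA_eq_map, Nat.div_eq_of_lt hsmall]
      simp only [word_list_to_long_alt]
      rw [wllChunks, dif_neg (by omega)]
      simp
    · replace hsmall := Nat.le_of_not_lt hsmall
      have hbs1 : 1 ≤ (if long_long then 4 else 2 : Nat) := by cases long_long <;> decide
      exact wllStep big_endian long_long l hsmall
        (ih _ (by simp only [List.length_drop]; omega))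

-- ===== VERDICT (by name: the statement is the Claim_ definition above) =====
theorem word_list_to_long_spec : Claim_equal_word_list_to_long := by
  intro val_list big_endian long_long _
  unfold Spec_word_list_to_long
  exact wllMain big_endian long_long val_list.length val_list le_rfl
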